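-- pv_equiv track=rewrite | github.com/71619997a/vary | shape.py | genBoxPoints
-- ===== SOURCE A (Python) =====
-- def genBoxPoints(x, y, z, w, h, d):
--     # how to preserve orientation for dummies
--     if w < 0:
--         return genBoxPoints(x + w, y, z, -w, h, d)
--     if h < 0:
--         return genBoxPoints(x, y + h, z, w, -h, d)
--     if d < 0:
--         return genBoxPoints(x, y, z + d, w, h, -d)
--     pts = []
--     for i in range(8):
--         xcor = x + (i >> 2) * w
--         ycor = y - (i >> 1) % 2 * h
--         zcor = z - d + i % 2 * d
--         pts.append([xcor, ycor, zcor])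
--     return pts
-- ===== SOURCE B (Python) =====
-- def genBoxPoints(x, y, z, w, h, d):
--     # closed form: no recursion, no loop, no branches — min/abs absorb the
--     # sign normalization, and all 8 corners are written out directly
--     x0 = x + min(w, 0)
--     x1 = x0 + abs(w)
--     y1 = y + min(h, 0)
--     y0 = y1 - abs(h)
--     z1 = z + min(d, 0)
--     z0 = z1 - abs(d)
--     return [[x0, y1, z0], [x0, y1, z1], [x0, y0, z0], [x0, y0, z1],
--             [x1, y1, z0], [x1, y1, z1], [x1, y0, z0], [x1, y0, z1]]
-- ===== Notes on version B (the rewrite author's own statement) =====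
-- stated objective: simpler
-- what changed: Replaces A's sign-normalizing tail recursion and the 8-iteration bit-decoding loop with a branch-free, loop-free closed form: the six face coordinates are computed once with min/abs and the 8 corners are returned as one literal list.
import Mathlib
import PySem

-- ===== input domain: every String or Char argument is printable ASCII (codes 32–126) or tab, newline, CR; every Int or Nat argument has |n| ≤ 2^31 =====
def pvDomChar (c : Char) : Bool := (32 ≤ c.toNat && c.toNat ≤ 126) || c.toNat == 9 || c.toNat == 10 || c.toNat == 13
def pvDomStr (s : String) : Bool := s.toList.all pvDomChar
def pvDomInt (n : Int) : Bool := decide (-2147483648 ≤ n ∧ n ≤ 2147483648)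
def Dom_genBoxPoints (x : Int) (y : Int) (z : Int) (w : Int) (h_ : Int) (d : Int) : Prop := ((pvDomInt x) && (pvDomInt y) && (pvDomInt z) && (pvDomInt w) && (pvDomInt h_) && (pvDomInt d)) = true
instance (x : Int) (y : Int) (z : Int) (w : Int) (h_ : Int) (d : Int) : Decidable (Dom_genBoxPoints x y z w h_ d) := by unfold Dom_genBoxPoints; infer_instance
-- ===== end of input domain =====

-- B replaces A's sign-normalizing recursion and 8-way bit-decoding loop with a
-- branch-free min/abs closed form and a literal list of the 8 corners; objective: simpler.

-- ===== PORT A =====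
-- literal transliteration: recursion normalizes one negative extent per call;
-- then a loop over range(8) decodes corner i via i>>2, (i>>1)%2, i%2
def genBoxPoints (x : Int) (y : Int) (z : Int) (w : Int) (h_ : Int) (d : Int) : List (List Int) :=
  if w < 0 then genBoxPoints (x + w) y z (-w) h_ d
  else if h_ < 0 then genBoxPoints x (y + h_) z w (-h_) d
  else if d < 0 then genBoxPoints x y (z + d) w h_ (-d)
  else
    (PySem.List.pyRange 0 8 1).foldl (fun pts (i : Int) =>
      pts ++ [[x + (i >>> (2:Nat)) * w,
               y - PySem.Int.mod (i >>> (1:Nat)) 2 * h_,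
               z - d + PySem.Int.mod i 2 * d]]) []
termination_by (if w < 0 then 1 else 0) + (if h_ < 0 then 1 else 0) + (if d < 0 then 1 else 0)
decreasing_by all_goals (split_ifs <;> omega)

-- ===== PORT B =====
def genBoxPoints_alt (x : Int) (y : Int) (z : Int) (w : Int) (h_ : Int) (d : Int) : List (List Int) :=
  let x0 := x + min w 0
  let x1 := x0 + |w|
  let y1 := y + min h_ 0
  let y0 := y1 - |h_|
  let z1 := z + min d 0
  let z0 := z1 - |d|
  [[x0, y1, z0], [x0, y1, z1], [x0, y0, z0], [x0, y0, z1],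
   [x1, y1, z0], [x1, y1, z1], [x1, y0, z0], [x1, y0, z1]]

-- ===== PRECONDITION & SPEC =====
def Spec_genBoxPoints (x : Int) (y : Int) (z : Int) (w : Int) (h_ : Int) (d : Int) (out : List (List Int)) : Prop := out = genBoxPoints_alt x y z w h_ d
instance (x : Int) (y : Int) (z : Int) (w : Int) (h_ : Int) (d : Int) (out : List (List Int)) : Decidable (Spec_genBoxPoints x y z w h_ d out) := by unfold Spec_genBoxPoints; infer_instance

-- ===== CLAIM (what is proved, stated in full; the proofs are below) =====
def Claim_equal_genBoxPoints : Prop := ∀ (x : Int) (y : Int) (z : Int) (w : Int) (h_ : Int) (d : Int), Dom_genBoxPoints x y z w h_ d → Spec_genBoxPoints x y z w h_ d (genBoxPoints x y z w h_ d)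

-- ===== LEMMAS AND PROOFS =====
-- both sides, fully evaluated when no extent is negative
theorem genBoxPoints_nonneg_eq (x y z w h_ d : Int) (hw : ¬ w < 0) (hh : ¬ h_ < 0) (hd : ¬ d < 0) :
    genBoxPoints x y z w h_ d = genBoxPoints_alt x y z w h_ d := by
  rw [genBoxPoints]
  simp only [hw, hh, hd, if_false]
  simp [genBoxPoints_alt, PySem.List.pyRange, PySem.Int.mod, List.foldl, List.range_succ]
  norm_num [Int.shiftRight_eq_div_pow, Int.fmod,
    abs_of_nonneg (show (0:Int) ≤ w by omega),
    abs_of_nonneg (show (0:Int) ≤ h_ by omega),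
    abs_of_nonneg (show (0:Int) ≤ d by omega)]
  omega

-- A's recursion steps leave B's value unchanged: min/abs are invariant under normalization
theorem gen_eq (x y z w h_ d : Int) : genBoxPoints x y z w h_ d = genBoxPoints_alt x y z w h_ d := by
  fun_induction genBoxPoints x y z w h_ d with
  | case1 x y z w h_ d hw ih =>
    rw [ih]; simp only [genBoxPoints_alt]
    have h1 : min (-w) 0 = 0 := by omega
    have h2 : min w 0 = w := by omega
    have h3 : |(-w)| = |w| := abs_neg w
    rw [h1, h2, h3]; ring_nf
  | case2 x y z w h_ d hw hh ih =>
    rw [ih]; simp only [genBoxPoints_alt]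
    have h1 : min (-h_) 0 = 0 := by omega
    have h2 : min h_ 0 = h_ := by omega
    have h3 : |(-h_)| = |h_| := abs_neg h_
    rw [h1, h2, h3]; ring_nf
  | case3 x y z w h_ d hw hh hd ih =>
    rw [ih]; simp only [genBoxPoints_alt]
    have h1 : min (-d) 0 = 0 := by omega
    have h2 : min d 0 = d := by omega
    have h3 : |(-d)| = |d| := abs_neg d
    rw [h1, h2, h3]; ring_nf
  | case4 x y z w h_ d hw hh hd =>
    have h := genBoxPoints_nonneg_eq x y z w h_ d hw hh hd
    rw [genBoxPoints] at h
    simp only [hw, hh, hd, if_false] at h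
    exact h

-- ===== VERDICT (by name: the statement is the Claim_ definition above) =====
theorem genBoxPoints_spec : Claim_equal_genBoxPoints := by
  intro x y z w h_ d _
  exact gen_eq x y z w h_ d
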